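-- pv_equiv track=rewrite | github.com/jhpps1/Java_std | 박혜은/AC.py | solve
-- ===== SOURCE A (Python) =====
-- def solve(command, n, p):
--     rev = False
--     if n == 0 and 'D' in command:
--         return "error"
--     for char in command:
--         if char == 'R':
--             rev = not rev
--         elif char == 'D':
--             if len(p) == 0:
--                 return "error"
--             if rev:
--                 p.pop()
--             else:
--                 p.pop(0)
--     if rev:
--         p.reverse()  # 변수에 할당하면 안된다(None 반환)
--     # 이것때메 틀린게 아니라고 해줘..
--     str = '[]'
--     if p:
--         str = '[' + ','.join(p) + ']'
--     return str
-- ===== SOURCE B (Python) =====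
-- def solve(command, n, p):
--     # One counting pass over the command (no list mutation, no emptiness check
--     # per 'D'): count total deletions d and front deletions, decide "error" by
--     # d > len(p), and take a single slice (reversed if needed) at the end.
--     # A mutates p in place; B does not -- equivalence is about the return value.
--     if n == 0 and 'D' in command:
--         return "error"
--     rev, front, d = False, 0, 0
--     for c in command:
--         if c == 'R':
--             rev = not rev
--         elif c == 'D':
--             d += 1
--             if not rev:
--                 front += 1
--     if d > len(p):
--         return "error"
--     q = p[front : len(p) - (d - front)]
--     if rev:
--         q = q[::-1]
--     return '[' + ','.join(q) + ']' if q else '[]'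
-- ===== Notes on version B (the rewrite author's own statement) =====
-- stated objective: alternative
-- what changed: Instead of simulating each D by popping the list and checking emptiness, B makes one counting pass over the command (total deletions and front deletions), decides error by comparing the deletion count with len(p), and produces the answer with a single slice plus one optional reverse.
import Mathlib
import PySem

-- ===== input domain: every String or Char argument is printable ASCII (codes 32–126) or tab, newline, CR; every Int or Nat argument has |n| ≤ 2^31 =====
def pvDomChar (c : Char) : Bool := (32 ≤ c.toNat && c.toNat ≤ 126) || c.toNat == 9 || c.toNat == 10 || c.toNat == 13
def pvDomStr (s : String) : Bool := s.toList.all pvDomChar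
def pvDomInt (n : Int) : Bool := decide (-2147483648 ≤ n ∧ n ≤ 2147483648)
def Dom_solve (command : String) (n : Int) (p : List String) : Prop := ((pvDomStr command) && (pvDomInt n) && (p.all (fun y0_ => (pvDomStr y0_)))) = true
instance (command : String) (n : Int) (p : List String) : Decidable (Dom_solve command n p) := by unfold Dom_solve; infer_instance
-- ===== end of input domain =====

-- B replaces A's per-'D' list popping by one counting pass over the command
-- (total deletions d, front deletions f), an error test d > len(p), and a single
-- final slice plus optional reverse; equivalence is about the RETURN value only
-- (the Python A mutates p in place, B does not).

-- ===== PORT A =====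
-- the for-loop over `command`: state = (rev, p); `none` = the early `return "error"`
def solveLoopA : List Char → Bool → List String → Option (Bool × List String)
  | [], rev, p => some (rev, p)
  | c :: cs, rev, p =>
    if c = 'R' then solveLoopA cs (!rev) p
    else if c = 'D' then
      if p.length = 0 then none
      else if rev then solveLoopA cs rev p.dropLast      -- p.pop()
      else solveLoopA cs rev p.tail                      -- p.pop(0)
    else solveLoopA cs rev p

def solve (command : String) (n : Int) (p : List String) : String :=
  if n = 0 ∧ command.toList.contains 'D' then "error"
  else
    match solveLoopA command.toList false p with
    | none => "error"
    | some (rev, p') =>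
      let p'' := if rev then p'.reverse else p'
      if p''.isEmpty then "[]"
      else "[" ++ PySem.Str.join "," p'' ++ "]"

-- ===== PORT B =====
-- the counting pass: accumulators (rev, front, d); never errors, touches no list
def countLoopB : List Char → Bool → Nat → Nat → Bool × Nat × Nat
  | [], rev, front, d => (rev, front, d)
  | c :: cs, rev, front, d =>
    if c = 'R' then countLoopB cs (!rev) front d
    else if c = 'D' then countLoopB cs rev (if rev then front else front + 1) (d + 1)
    else countLoopB cs rev front d

def solve_alt (command : String) (n : Int) (p : List String) : String :=
  if n = 0 ∧ command.toList.contains 'D' then "error"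
  else
    let (rev, front, d) := countLoopB command.toList false 0 0
    if p.length < d then "error"
    else
      let q := PySem.List.slice p (some (front : Int))
                 (some ((p.length : Int) - ((d : Int) - (front : Int))))
      let q := if rev then q.reverse else q
      if q.isEmpty then "[]"
      else "[" ++ PySem.Str.join "," q ++ "]"

-- ===== PRECONDITION & SPEC =====
def Spec_solve (command : String) (n : Int) (p : List String) (out : String) : Prop := out = solve_alt command n p
instance (command : String) (n : Int) (p : List String) (out : String) : Decidable (Spec_solve command n p out) := by unfold Spec_solve; infer_instance

-- ===== CLAIM =====
def Claim_equal_solve : Prop := ∀ (command : String) (n : Int) (p : List String), Dom_solve command n p → Spec_solve command n p (solve command n p)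

-- ===== LEMMAS AND PROOFS =====

-- step lemmas for the two loops (literal-branch reductions)
lemma countB_R (cs : List Char) (rev : Bool) (f d : Nat) :
    countLoopB ('R' :: cs) rev f d = countLoopB cs (!rev) f d := by simp [countLoopB]
lemma countB_D_t (cs : List Char) (f d : Nat) :
    countLoopB ('D' :: cs) true f d = countLoopB cs true f (d + 1) := by simp [countLoopB]
lemma countB_D_f (cs : List Char) (f d : Nat) :
    countLoopB ('D' :: cs) false f d = countLoopB cs false (f + 1) (d + 1) := by simp [countLoopB]
lemma countB_other (c : Char) (cs : List Char) (rev : Bool) (f d : Nat)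
    (h1 : ¬c = 'R') (h2 : ¬c = 'D') :
    countLoopB (c :: cs) rev f d = countLoopB cs rev f d := by simp [countLoopB, h1, h2]
lemma loopA_R (cs : List Char) (rev : Bool) (p : List String) :
    solveLoopA ('R' :: cs) rev p = solveLoopA cs (!rev) p := by simp [solveLoopA]
lemma loopA_D (cs : List Char) (rev : Bool) (p : List String) :
    solveLoopA ('D' :: cs) rev p =
      if p.length = 0 then none
      else if rev then solveLoopA cs rev p.dropLast else solveLoopA cs rev p.tail := by
  simp [solveLoopA]
lemma loopA_other (c : Char) (cs : List Char) (rev : Bool) (p : List String)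
    (h1 : ¬c = 'R') (h2 : ¬c = 'D') :
    solveLoopA (c :: cs) rev p = solveLoopA cs rev p := by simp [solveLoopA, h1, h2]

-- accumulators of the counting pass only shift the result
lemma countLoopB_shift (cs : List Char) :
    ∀ (rev : Bool) (f d : Nat),
      countLoopB cs rev f d =
        ((countLoopB cs rev 0 0).1, f + (countLoopB cs rev 0 0).2.1,
          d + (countLoopB cs rev 0 0).2.2) := by
  induction cs with
  | nil => intro rev f d; simp [countLoopB]
  | cons c cs ih =>
    intro rev f d
    by_cases hR : c = 'R'
    · subst hR; rw [countB_R, countB_R, ih (!rev) f d]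
    · by_cases hD : c = 'D'
      · subst hD
        cases rev with
        | true =>
          rw [countB_D_t, countB_D_t, ih true f (d + 1), ih true 0 (0 + 1)]
          simp; omega
        | false =>
          rw [countB_D_f, countB_D_f, ih false (f + 1) (d + 1), ih false (0 + 1) (0 + 1)]
          simp; omega
      · rw [countB_other c cs rev f d hR hD, countB_other c cs rev 0 0 hR hD, ih rev f d]

-- front deletions never exceed total deletions
lemma countLoopB_le (cs : List Char) :
    ∀ (rev : Bool), (countLoopB cs rev 0 0).2.1 ≤ (countLoopB cs rev 0 0).2.2 := by
  induction cs with
  | nil => intro rev; simp [countLoopB]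
  | cons c cs ih =>
    intro rev
    by_cases hR : c = 'R'
    · subst hR; rw [countB_R]; exact ih (!rev)
    · by_cases hD : c = 'D'
      · subst hD
        cases rev with
        | true =>
          rw [countB_D_t, countLoopB_shift cs true 0 (0 + 1)]
          have := ih true; simp; omega
        | false =>
          rw [countB_D_f, countLoopB_shift cs false (0 + 1) (0 + 1)]
          have := ih false; simp; omega
      · rw [countB_other c cs rev 0 0 hR hD]; exact ih rev

-- main invariant: A's simulation equals the counted window of the original list
lemma loop_agree (cs : List Char) :
    ∀ (rev : Bool) (p : List String),
      if p.length < (countLoopB cs rev 0 0).2.2 then solveLoopA cs rev p = none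
      else solveLoopA cs rev p =
        some ((countLoopB cs rev 0 0).1,
          (p.drop (countLoopB cs rev 0 0).2.1).take (p.length - (countLoopB cs rev 0 0).2.2)) := by
  induction cs with
  | nil => intro rev p; simp [countLoopB, solveLoopA]
  | cons c cs ih =>
    intro rev p
    by_cases hR : c = 'R'
    · subst hR; rw [countB_R, loopA_R]; exact ih (!rev) p
    · by_cases hD : c = 'D'
      · subst hD
        cases rev with
        | true =>
          rw [countB_D_t, loopA_D, countLoopB_shift cs true 0 (0 + 1)]
          have hle := countLoopB_le cs true
          rcases hp : p.length with _ | m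
          · simp
          · have h := ih true p.dropLast
            have hdl : p.dropLast.length = m := by simp [List.length_dropLast, hp]
            simp only [hdl] at h
            simp only [if_true]
            by_cases hbig : m < (countLoopB cs true 0 0).2.2
            · have hbig' : m + 1 < 0 + 1 + (countLoopB cs true 0 0).2.2 := by omega
              simp only [hbig, if_true] at h
              simp [hbig', h]
            · have h2 : ¬ m + 1 < 0 + 1 + (countLoopB cs true 0 0).2.2 := by omega
              simp only [hbig, if_false] at h
              simp only [h2, if_false, h]
              rw [if_neg (show ¬ m + 1 = 0 by omega)]
              -- dropLast then drop/take = drop/take on p (window stays left of the end)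
              have hdd : p.dropLast.drop (countLoopB cs true 0 0).2.1 =
                  (p.drop (countLoopB cs true 0 0).2.1).dropLast := by
                simp only [List.dropLast_eq_take, List.drop_take, List.length_drop]
                congr 1
                omega
              have hwin : (p.dropLast.drop (countLoopB cs true 0 0).2.1).take
                    (m - (countLoopB cs true 0 0).2.2) =
                  (p.drop (0 + (countLoopB cs true 0 0).2.1)).take
                    (m + 1 - (0 + 1 + (countLoopB cs true 0 0).2.2)) := by
                rw [hdd, List.dropLast_eq_take, List.take_take]
                congr 1
                · simp [List.length_drop, hp]
                  omega
                · try simp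
              rw [hwin]
        | false =>
          rw [countB_D_f, loopA_D, countLoopB_shift cs false (0 + 1) (0 + 1)]
          have hle := countLoopB_le cs false
          rcases hp : p.length with _ | m
          · simp
          · have h := ih false p.tail
            have htl : p.tail.length = m := by simp [List.length_tail, hp]
            simp only [htl] at h
            dsimp only
            by_cases hbig : m < (countLoopB cs false 0 0).2.2
            · have hbig' : m + 1 < 0 + 1 + (countLoopB cs false 0 0).2.2 := by omega
              simp only [hbig, if_true] at h
              simp [hbig', h]
            · have h2 : ¬ m + 1 < 0 + 1 + (countLoopB cs false 0 0).2.2 := by omega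
              simp only [hbig, if_false] at h
              simp only [h2, if_false, h]
              rw [if_neg (show ¬ m + 1 = 0 by omega)]
              have hwin : (p.tail.drop (countLoopB cs false 0 0).2.1).take
                    (m - (countLoopB cs false 0 0).2.2) =
                  (p.drop (0 + 1 + (countLoopB cs false 0 0).2.1)).take
                    (m + 1 - (0 + 1 + (countLoopB cs false 0 0).2.2)) := by
                rw [← List.drop_one, List.drop_drop]
                congr 1; omega
              rw [hwin]
              simp
      · rw [countB_other c cs rev 0 0 hR hD, loopA_other c cs rev p hR hD]; exact ih rev p

-- ===== VERDICT =====
theorem solve_spec : Claim_equal_solve := by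
  intro command n p _
  unfold Spec_solve solve solve_alt
  by_cases hg : n = 0 ∧ command.toList.contains 'D'
  · have hmem : 'D' ∈ command.toList := by simpa using hg.2
    simp [hg.1, hmem]
  · simp only [hg, if_false]
    have h := loop_agree command.toList false p
    have hle := countLoopB_le command.toList false
    rcases hr : countLoopB command.toList false 0 0 with ⟨rev, front, d⟩
    simp only [hr] at h hle
    by_cases hbig : p.length < d
    · simp only [hbig, if_true] at h ⊢
      simp [h]
    · simp only [hbig, if_false] at h ⊢
      rw [h]
      have hcast : (p.length : Int) - ((d : Int) - (front : Int)) =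
          (front : Int) + ((p.length - d : Nat) : Int) := by omega
      rw [hcast, PySem.List.slice_natCast_add]
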